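-- pv_equiv track=rewrite | github.com/laisuk/OpenccPurepyGui | pdf_module/pdf_helper.py | collapse_repeated_token
-- ===== SOURCE A (Python) =====
-- from typing import Callable, List, Optional, Sequence
--
-- def collapse_repeated_token(token: Optional[str]) -> Optional[str]:
--     if token is None:
--         return None
--
--     length = len(token)
--     if length < 4 or length > 200:
--         return token
--
--     for unit_len in range(4, 11):
--         if unit_len > length // 3:
--             break
--         if length % unit_len != 0:
--             continue
--
--         unit = token[:unit_len]
--         all_match = True
--         for pos in range(0, length, unit_len):
--             if token[pos:pos + unit_len] != unit:
--                 all_match = False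
--                 break
--
--         if all_match:
--             return unit
--
--     return token
-- ===== SOURCE B (Python) =====
-- from typing import Optional
--
--
-- def collapse_repeated_token(token: Optional[str]) -> Optional[str]:
--     if token is None:
--         return None
--
--     n = len(token)
--     if n < 4 or n > 200:
--         return token
--
--     # smallest rotation period: least p >= 1 with token == token[p:] + token[:p]
--     p = (token + token).find(token, 1)
--
--     for unit_len in range(4, 11):
--         if unit_len > n // 3:
--             break
--         if n % unit_len == 0 and unit_len % p == 0:
--             return token[:unit_len]
--
--     return token
-- ===== Notes on version B (the rewrite author's own statement) =====
-- stated objective: alternative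
-- what changed: B computes the minimal rotation period once with the (token+token).find(token,1) doubling trick and replaces A's per-candidate block-by-block scan with a divisibility test per candidate length.
import Mathlib
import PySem

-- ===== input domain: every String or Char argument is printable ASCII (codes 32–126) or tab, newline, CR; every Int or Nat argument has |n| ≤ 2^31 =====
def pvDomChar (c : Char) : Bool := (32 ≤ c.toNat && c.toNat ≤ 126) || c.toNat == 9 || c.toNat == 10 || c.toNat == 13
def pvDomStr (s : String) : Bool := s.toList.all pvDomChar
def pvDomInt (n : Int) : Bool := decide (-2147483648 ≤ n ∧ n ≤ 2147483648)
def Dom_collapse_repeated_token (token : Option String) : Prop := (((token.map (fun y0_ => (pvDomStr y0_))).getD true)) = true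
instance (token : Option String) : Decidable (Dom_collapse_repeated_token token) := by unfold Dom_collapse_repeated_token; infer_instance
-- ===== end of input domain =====

-- B replaces A's per-candidate block scan by one minimal-rotation-period computation
-- ((token+token).find(token,1)) followed by a divisibility test per candidate length.

-- ===== PORT A =====
-- inner 'for pos in range(0, length, unit_len)' loop with its break
def pvAllMatchA (cs unit : List Char) (unitLen : Int) : List Int → Bool
  | [] => true
  | pos :: rest =>
    if PySem.List.slice cs (some pos) (some (pos + unitLen)) ≠ unit then false
    else pvAllMatchA cs unit unitLen rest

-- outer 'for unit_len in range(4, 11)' loop with break/continue/early return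
def pvLoopA (cs : List Char) (length : Int) : List Int → Option (List Char)
  | [] => none
  | u :: rest =>
    if u > PySem.Int.floordiv length 3 then none
    else if PySem.Int.mod length u ≠ 0 then pvLoopA cs length rest
    else
      let unit := PySem.List.slice cs none (some u)
      if pvAllMatchA cs unit u (PySem.List.pyRange 0 length u) then some unit
      else pvLoopA cs length rest

def collapse_repeated_token (token : Option String) : Option String :=
  match token with
  | none => none
  | some t =>
    let length : Int := PySem.Str.len t
    if length < 4 ∨ length > 200 then some t
    else
      match pvLoopA t.toList length (PySem.List.pyRange 4 11 1) with
      | some unit => some (String.ofList unit)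
      | none => some t

-- ===== PORT B =====
-- B's 'for unit_len in range(4, 11)' loop with break/early return
def pvLoopB (cs : List Char) (n p : Int) : List Int → Option (List Char)
  | [] => none
  | u :: rest =>
    if u > PySem.Int.floordiv n 3 then none
    else if PySem.Int.mod n u = 0 ∧ PySem.Int.mod u p = 0 then
      some (PySem.List.slice cs none (some u))
    else pvLoopB cs n p rest

def collapse_repeated_token_alt (token : Option String) : Option String :=
  match token with
  | none => none
  | some t =>
    let n : Int := PySem.Str.len t
    if n < 4 ∨ n > 200 then some t
    else
      -- p = (token + token).find(token, 1)
      let p : Int := PySem.Chars.findFrom (t.toList ++ t.toList) t.toList 1 none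
      match pvLoopB t.toList n p (PySem.List.pyRange 4 11 1) with
      | some unit => some (String.ofList unit)
      | none => some t

-- ===== PRECONDITION & SPEC =====
def Spec_collapse_repeated_token (token : Option String) (out : Option String) : Prop := out = collapse_repeated_token_alt token
instance (token : Option String) (out : Option String) : Decidable (Spec_collapse_repeated_token token out) := by unfold Spec_collapse_repeated_token; infer_instance

-- ===== CLAIM (what is proved, stated in full; the proofs are below) =====
def Claim_equal_collapse_repeated_token : Prop := ∀ (token : Option String), Dom_collapse_repeated_token token → Spec_collapse_repeated_token token (collapse_repeated_token token)


-- ===== LEMMAS AND PROOFS =====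

-- A's inner loop is an all-check over the positions list
theorem pvAllMatchA_eq_all (cs unit : List Char) (ul : Int) (ps : List Int) :
    pvAllMatchA cs unit ul ps = true ↔ ∀ pos ∈ ps, PySem.List.slice cs (some pos) (some (pos + ul)) = unit := by
  induction ps with
  | nil => simp [pvAllMatchA]
  | cons p rest ih =>
    by_cases h : PySem.List.slice cs (some p) (some (p + ul)) = unit <;>
      simp [pvAllMatchA, h, ih]

-- occurrence of cs at offset k inside cs ++ cs is exactly "rotation by k fixes cs"
theorem prefix_drop_append_iff_rotate (cs : List Char) (k : Nat) (hk : k ≤ cs.length) :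
    cs <+: (cs ++ cs).drop k ↔ cs.rotate k = cs := by
  have hdrop : (cs ++ cs).drop k = cs.drop k ++ cs := by
    rw [List.drop_append, Nat.sub_eq_zero_of_le hk, List.drop_zero]
  have htake : (cs.drop k ++ cs).take cs.length = cs.drop k ++ cs.take k := by
    rw [List.take_append, List.length_drop,
      List.take_of_length_le (by simp), Nat.sub_sub_self hk]
  rw [hdrop, List.prefix_iff_eq_take, htake, List.rotate_eq_drop_append_take hk, eq_comm]

-- rotation fixed by a period is fixed by its multiples
theorem rotate_mul_eq_self (cs : List Char) (p : Nat) (h : cs.rotate p = cs) (q : Nat) :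
    cs.rotate (q * p) = cs := by
  induction q with
  | zero => simp
  | succ q ih =>
    have h2 : cs.rotate (q * p + p) = (cs.rotate (q * p)).rotate p := by
      rw [List.rotate_rotate]
    rw [Nat.succ_mul, h2, ih, h]

-- the set of fixing rotations is the set of multiples of the least one
theorem rotate_eq_iff_dvd (cs : List Char) (P : Nat) (hP0 : 0 < P)
    (hrotP : cs.rotate P = cs) (hmin : ∀ i, 1 ≤ i → i < P → cs.rotate i ≠ cs)
    (u : Nat) : cs.rotate u = cs ↔ P ∣ u := by
  constructor
  · intro h
    have hsplit : P * (u / P) + u % P = u := Nat.div_add_mod u P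
    have h1 : cs.rotate (P * (u / P)) = cs := by
      rw [Nat.mul_comm]; exact rotate_mul_eq_self cs P hrotP (u / P)
    have h2 : cs.rotate (u % P) = cs := by
      have := List.rotate_rotate cs (P * (u / P)) (u % P)
      rw [h1, hsplit, h] at this
      exact this
    rcases Nat.eq_zero_or_pos (u % P) with h0 | hpos
    · exact Nat.dvd_of_mod_eq_zero h0
    · exact absurd h2 (hmin _ hpos (Nat.mod_lt _ hP0))
  · rintro ⟨k, rfl⟩
    rw [Nat.mul_comm]; exact rotate_mul_eq_self cs P hrotP k

-- flatten-replicate toolbox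
theorem flat_cons (a : List Char) (m : Nat) :
    (List.replicate (m + 1) a).flatten = a ++ (List.replicate m a).flatten := by
  simp [List.replicate_succ]

theorem flat_snoc (a : List Char) (m : Nat) :
    (List.replicate (m + 1) a).flatten = (List.replicate m a).flatten ++ a := by
  induction m with
  | zero => simp
  | succ m ih =>
    rw [flat_cons, ih, ← List.append_assoc, ← flat_cons, ih]

theorem drop_flat_rep (a : List Char) (u : Nat) (ha : a.length = u) :
    ∀ (k m : Nat), k ≤ m →
      ((List.replicate m a).flatten).drop (k * u) = (List.replicate (m - k) a).flatten := by
  intro k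
  induction k with
  | zero => intro m _; simp
  | succ k ih =>
    intro m hk
    cases m with
    | zero => omega
    | succ m =>
      rw [flat_cons, Nat.succ_mul, List.drop_append, ha,
        List.drop_of_length_le (by rw [ha]; omega : a.length ≤ k * u + u)]
      have : k * u + u - u = k * u := by omega
      rw [this, List.nil_append, ih m (by omega)]
      have h5 : m + 1 - (k + 1) = m - k := by omega
      rw [h5]

theorem take_flat_rep (a : List Char) (u : Nat) (ha : a.length = u) (m : Nat) (hm : 1 ≤ m) :
    ((List.replicate m a).flatten).take u = a := by
  cases m with
  | zero => omega
  | succ m =>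
    rw [flat_cons, List.take_append, ha, Nat.sub_self, List.take_zero, List.append_nil,
      ← ha, List.take_length]

-- blocks from the replicated representation
theorem blocks_of_rep (cs a : List Char) (u m : Nat) (ha : a.length = u) (hm : 1 ≤ m)
    (hrep : cs = (List.replicate m a).flatten) :
    ∀ k < m, (cs.drop (k * u)).take u = cs.take u := by
  intro k hk
  rw [hrep, drop_flat_rep a u ha k m (by omega),
    take_flat_rep a u ha (m - k) (by omega), take_flat_rep a u ha m hm]

-- the replicated representation from the blocks
theorem rep_of_blocks (u : Nat) (hu : 0 < u) :
    ∀ (m : Nat) (cs : List Char), cs.length = u * m →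
      (∀ k < m, (cs.drop (k * u)).take u = cs.take u) →
      cs = (List.replicate m (cs.take u)).flatten := by
  intro m
  induction m with
  | zero => intro cs h _; simp at h; simp [h]
  | succ m ih =>
    intro cs hlen hblocks
    have hucs : u ≤ cs.length := by rw [hlen]; nlinarith
    have hb : (cs.drop u).length = u * m := by rw [List.length_drop, hlen]; ring_nf; omega
    rcases Nat.eq_zero_or_pos m with hm0 | hm1
    · subst hm0
      have hcl : cs.length = u := by simpa using hlen
      simp [List.take_of_length_le (le_of_eq hcl)]
    · have hfirst : (cs.drop u).take u = cs.take u := by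
        have := hblocks 1 (by omega)
        simpa using this
      have hbblocks : ∀ k < m, ((cs.drop u).drop (k * u)).take u = (cs.drop u).take u := by
        intro k hk
        rw [List.drop_drop, hfirst]
        have heq : k * u + u = (k + 1) * u := by ring
        have heq2 : u + k * u = (k + 1) * u := by ring
        rw [heq2]
        exact hblocks (k + 1) (by omega)
      have hrec := ih (cs.drop u) hb hbblocks
      rw [hfirst] at hrec
      rw [flat_cons, ← hrec]
      exact (List.take_append_drop u cs).symm

-- a fixed u-rotation from the replicated representation
theorem rot_of_rep (cs a : List Char) (u m : Nat) (ha : a.length = u) (hm : 1 ≤ m)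
    (hrep : cs = (List.replicate m a).flatten) :
    cs.drop u ++ cs.take u = cs := by
  have h1 : cs.drop u = (List.replicate (m - 1) a).flatten := by
    rw [hrep, ← Nat.one_mul u, drop_flat_rep a u ha 1 m hm]
  have h2 : cs.take u = a := by rw [hrep]; exact take_flat_rep a u ha m hm
  rw [h1, h2, hrep]
  have h3 := flat_snoc a (m - 1)
  rw [show m - 1 + 1 = m by omega] at h3
  exact h3.symm

-- the replicated representation from a fixed u-rotation
theorem rep_of_rot (u : Nat) (hu : 0 < u) :
    ∀ (m : Nat) (cs : List Char), cs.length = u * m →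
      cs.drop u ++ cs.take u = cs →
      cs = (List.replicate m (cs.take u)).flatten := by
  intro m
  induction m with
  | zero => intro cs h _; simp at h; simp [h]
  | succ m ih =>
    intro cs hlen hrot
    have hucs : u ≤ cs.length := by rw [hlen]; nlinarith
    have hb : (cs.drop u).length = u * m := by rw [List.length_drop, hlen]; ring_nf; omega
    have htakea : (cs.take u).length = u := by rw [List.length_take]; omega
    rcases Nat.eq_zero_or_pos m with hm0 | hm1
    · subst hm0
      have hcl : cs.length = u := by simpa using hlen
      simp [List.take_of_length_le (le_of_eq hcl)]
    · have hub : u ≤ (cs.drop u).length := by rw [hb]; nlinarith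
      have hcomm : cs.drop u ++ cs.take u = cs.take u ++ cs.drop u := by
        rw [hrot, List.take_append_drop]
      have hbtake : (cs.drop u).take u = cs.take u := by
        have h := congrArg (List.take u) hcomm
        rw [List.take_append, List.take_append, htakea,
          List.take_of_length_le (le_of_eq htakea),
          Nat.sub_eq_zero_of_le hub, Nat.sub_self] at h
        simpa using h
      have hbrot : (cs.drop u).drop u ++ (cs.drop u).take u = cs.drop u := by
        have h := congrArg (List.drop u) hcomm
        rw [List.drop_append, List.drop_append, htakea,
          List.drop_of_length_le (le_of_eq htakea),
          Nat.sub_eq_zero_of_le hub, Nat.sub_self] at h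
        simp at h
        rw [hbtake, List.drop_drop]
        exact h
      have hrec := ih (cs.drop u) hb hbrot
      rw [hbtake] at hrec
      rw [flat_cons, ← hrec]
      exact (List.take_append_drop u cs).symm

-- per-candidate: A's block check is exactly "rotation by u fixes cs"
theorem blocks_iff_rotate (cs : List Char) (u m : Nat) (hu : 0 < u) (hm : 1 ≤ m)
    (hlen : cs.length = u * m) :
    (∀ k < m, (cs.drop (k * u)).take u = cs.take u) ↔ cs.rotate u = cs := by
  have hucs : u ≤ cs.length := by rw [hlen]; nlinarith
  have htakea : (cs.take u).length = u := by rw [List.length_take]; omega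
  rw [List.rotate_eq_drop_append_take hucs]
  constructor
  · intro h
    exact rot_of_rep cs (cs.take u) u m htakea hm (rep_of_blocks u hu m cs hlen h)
  · intro h
    exact blocks_of_rep cs (cs.take u) u m htakea hm (rep_of_rot u hu m cs hlen h)

-- A's quantifier over range(0, N, u) is the quantifier over the m blocks
theorem blocksRange_iff (cs : List Char) (u m : Nat) (hu : 0 < u)
    (hlen : cs.length = u * m) :
    (∀ pos ∈ PySem.List.pyRange 0 (cs.length : Int) (u : Int),
        PySem.List.slice cs (some pos) (some (pos + (u : Int))) = cs.take u) ↔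
      (∀ k < m, (cs.drop (k * u)).take u = cs.take u) := by
  have hu' : (0 : Int) < (u : Int) := by exact_mod_cast hu
  constructor
  · intro h k hk
    have hmem : ((k * u : Nat) : Int) ∈ PySem.List.pyRange 0 (cs.length : Int) (u : Int) := by
      rw [PySem.List.mem_pyRange_iff_of_pos hu']
      refine ⟨by positivity, ?_, ?_⟩
      · have hklt : k * u < cs.length := by rw [hlen]; nlinarith
        exact_mod_cast hklt
      · push_cast; exact ⟨(k : Int), by ring⟩
    have := h _ hmem
    rwa [PySem.List.slice_natCast_add cs (k * u) u] at this
  · intro h pos hmem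
    rw [PySem.List.mem_pyRange_iff_of_pos hu'] at hmem
    obtain ⟨h0, hlt, hdvd⟩ := hmem
    rw [Int.sub_zero] at hdvd
    obtain ⟨j, hj⟩ := hdvd
    have hj0 : 0 ≤ j := by
      by_contra hneg
      push_neg at hneg
      nlinarith
    have hjk : j = (j.toNat : Int) := (Int.toNat_of_nonneg hj0).symm
    have hpos : pos = ((j.toNat * u : Nat) : Int) := by
      push_cast
      conv_lhs => rw [hj, hjk]
      ring
    have hklt : j.toNat < m := by
      have h1 : ((j.toNat * u : Nat) : Int) < (cs.length : Int) := hpos ▸ hlt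
      have h2 : j.toNat * u < cs.length := by exact_mod_cast h1
      rw [hlen] at h2
      by_contra hge
      push_neg at hge
      nlinarith
    rw [hpos, PySem.List.slice_natCast_add cs (j.toNat * u) u]
    exact h j.toNat hklt

-- the two candidate loops agree
theorem loop_eq (cs : List Char) (P : Nat) (hP0 : 0 < P)
    (hdvd : ∀ u : Nat, cs.rotate u = cs ↔ P ∣ u) :
    ∀ us : List Int, (∀ u ∈ us, 1 ≤ u) →
      pvLoopA cs (cs.length : Int) us = pvLoopB cs (cs.length : Int) ((P : Nat) : Int) us := by
  intro us
  induction us with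
  | nil => intro _; rfl
  | cons u rest ih =>
    intro hall
    have hu1 : (1 : Int) ≤ u := hall u List.mem_cons_self
    have hrest := ih (fun v hv => hall v (List.mem_cons_of_mem u hv))
    by_cases hbr : ((cs.length : Int)) / 3 < u
    · simp [pvLoopA, pvLoopB, hbr]
    · by_cases hdv : PySem.Int.mod (cs.length : Int) u = 0
      · -- u divides the length: the checks are equivalent
        have hu : u = (u.toNat : Int) := (Int.toNat_of_nonneg (by omega)).symm
        set un := u.toNat with hun
        have hu0 : 0 < un := by omega
        have hdvN : un ∣ cs.length := by
          rw [hu, PySem.Int.mod_natCast] at hdv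
          exact Nat.dvd_of_mod_eq_zero (by exact_mod_cast hdv)
        obtain ⟨m, hm⟩ := hdvN
        have h3u : 3 * un ≤ cs.length := by
          rw [hu] at hbr
          omega
        have hm1 : 1 ≤ m := by nlinarith
        have hkey : (pvAllMatchA cs (PySem.List.slice cs none (some u)) u
              (PySem.List.pyRange 0 (cs.length : Int) u) = true) ↔
            PySem.Int.mod u ((P : Nat) : Int) = 0 := by
          rw [hu, PySem.List.slice_to_natCast, pvAllMatchA_eq_all,
            blocksRange_iff cs un m hu0 hm,
            blocks_iff_rotate cs un m hu0 hm1 hm, hdvd un,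
            PySem.Int.mod_eq_zero_iff_dvd]
          exact (Int.natCast_dvd_natCast).symm
        by_cases hmatch : pvAllMatchA cs (PySem.List.slice cs none (some u)) u
            (PySem.List.pyRange 0 (cs.length : Int) u) = true
        · have hB := hkey.mp hmatch
          simp [pvLoopA, pvLoopB, hbr, hdv, hmatch, hB]
        · have hB : ¬ PySem.Int.mod u ((P : Nat) : Int) = 0 := fun h => hmatch (hkey.mpr h)
          simp [pvLoopA, pvLoopB, hbr, hdv, hmatch, hB]
          exact hrest
      · -- continue on both sides
        simp [pvLoopA, pvLoopB, hbr, hdv]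
        exact hrest

-- ===== VERDICT (by name: the statement is the Claim_ definition above) =====
theorem collapse_repeated_token_spec : Claim_equal_collapse_repeated_token := by
  intro token _
  unfold Spec_collapse_repeated_token
  cases token with
  | none => rfl
  | some t =>
    unfold collapse_repeated_token collapse_repeated_token_alt
    simp only [PySem.Str.len_eq]
    split_ifs with hguard
    · rfl
    · set cs := t.toList with hcs
      have hN4 : 4 ≤ cs.length := by omega
      -- facts about p = (cs ++ cs).find(cs, 1)
      have h1len : 1 ≤ (cs ++ cs).length := by simp; omega
      have hoccN : cs <+: (cs ++ cs).drop cs.length :=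
        (prefix_drop_append_iff_rotate cs cs.length (le_refl _)).mpr (List.rotate_length cs)
      have hne : PySem.Chars.findFrom (cs ++ cs) cs ((1 : Nat) : Int) none ≠ -1 := by
        intro hEq
        rw [PySem.Chars.findFrom_natCast_eq_neg_one_iff (cs ++ cs) cs 1 h1len] at hEq
        apply hEq
        have hdd : ((cs ++ cs).drop 1).drop (cs.length - 1) = (cs ++ cs).drop cs.length := by
          rw [List.drop_drop]
          congr 1
          omega
        have h1 : cs <:+: ((cs ++ cs).drop 1).drop (cs.length - 1) :=
          (hdd ▸ hoccN).isInfix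
        exact h1.trans (List.drop_suffix _ _).isInfix
      obtain ⟨hp1, hpre, hmin⟩ :=
        PySem.Chars.findFrom_natCast_spec (cs ++ cs) cs 1 h1len hne
      set P := (PySem.Chars.findFrom (cs ++ cs) cs ((1 : Nat) : Int) none).toNat with hPdef
      have hp0 : (0 : Int) < PySem.Chars.findFrom (cs ++ cs) cs ((1 : Nat) : Int) none :=
        lt_of_lt_of_le (by norm_num) hp1
      have hpP : PySem.Chars.findFrom (cs ++ cs) cs ((1 : Nat) : Int) none = (P : Int) :=
        (Int.toNat_of_nonneg (le_of_lt hp0)).symm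
      have hP1 : 1 ≤ P := by
        have := hp1
        rw [hpP] at this
        exact_mod_cast this
      have hPN : P ≤ cs.length := by
        by_contra hgt
        push_neg at hgt
        exact hmin cs.length (by omega) hgt
          (by rwa [List.prefix_iff_eq_take] at hoccN ⊢)
      have hrotP : cs.rotate P = cs := (prefix_drop_append_iff_rotate cs P hPN).mp hpre
      have hminrot : ∀ i, 1 ≤ i → i < P → cs.rotate i ≠ cs := by
        intro i h1 h2 hrot
        exact hmin i h1 h2 ((prefix_drop_append_iff_rotate cs i (by omega)).mpr hrot)
      have hdvd := rotate_eq_iff_dvd cs P (by omega) hrotP hminrot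
      have hall : ∀ u ∈ PySem.List.pyRange 4 11 1, (1 : Int) ≤ u := by
        intro u hu
        have := (PySem.List.mem_pyRange_one).mp hu
        omega
      have hloops := loop_eq cs P (by omega) hdvd (PySem.List.pyRange 4 11 1) hall
      have hfind : PySem.Chars.findFrom (cs ++ cs) cs (1 : Int) none = (P : Int) := by
        simpa using hpP
      rw [hfind, hloops]
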